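-- pv_equiv track=rewrite | github.com/JyothiSwaroopReddy07/Scribe-evals | src/ensemble_evaluator.py | _aggregate_severity
-- ===== SOURCE A (Python) =====
-- from typing import List, Dict, Any, Optional, Tuple
--
-- def _aggregate_severity(issues: List[Dict[str, Any]]) -> str:
--     """Aggregate severity from multiple issues (take worst)."""
--     severity_order = ["critical", "high", "medium", "low", "info"]
--
--     severities = [
--         issue.get("severity", "medium").lower()
--         for issue in issues
--     ]
--
--     for sev in severity_order:
--         if sev in severities:
--             return sev
--
--     return "medium"
-- ===== SOURCE B (Python) =====
-- def _aggregate_severity(issues):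
--     """Aggregate severity from multiple issues (take worst)."""
--     rank = {"critical": 0, "high": 1, "medium": 2, "low": 3, "info": 4}
--     best = None  # (rank, name) of worst severity seen so far
--     for issue in issues:
--         name = issue.get("severity", "medium").lower()
--         r = rank.get(name)
--         if r is not None and (best is None or r < best[0]):
--             best = (r, name)
--     return best[1] if best is not None else "medium"
-- ===== Notes on version B (the rewrite author's own statement) =====
-- stated objective: simpler
-- what changed: Replaces A's build-a-severities-list-then-scan-the-priority-order structure with a rank table and a single min-tracking pass over the issues.
import Mathlib
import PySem

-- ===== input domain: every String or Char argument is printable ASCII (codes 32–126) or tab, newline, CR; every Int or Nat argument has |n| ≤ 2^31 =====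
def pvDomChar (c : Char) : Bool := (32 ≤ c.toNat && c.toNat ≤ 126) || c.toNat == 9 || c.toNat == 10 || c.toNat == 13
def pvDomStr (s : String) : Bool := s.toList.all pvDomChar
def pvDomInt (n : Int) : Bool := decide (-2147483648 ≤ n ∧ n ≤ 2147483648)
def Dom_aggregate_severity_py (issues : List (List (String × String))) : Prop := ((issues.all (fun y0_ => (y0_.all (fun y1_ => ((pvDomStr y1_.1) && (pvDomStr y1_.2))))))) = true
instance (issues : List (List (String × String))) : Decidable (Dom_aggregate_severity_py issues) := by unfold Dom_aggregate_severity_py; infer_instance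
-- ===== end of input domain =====

-- B replaces A's build-a-severities-list-then-scan-the-priority-order structure with a
-- rank table and a single min-tracking pass over the issues (objective: simpler).

-- ===== PORT A =====
def pvSevOrder : List String := ["critical", "high", "medium", "low", "info"]

-- the 'for sev in severity_order: if sev in severities: return sev' loop
def pvScan (severities : List String) : List String → String
  | [] => "medium"
  | s :: rest => if severities.contains s then s else pvScan severities rest

def aggregate_severity_py (issues : List (List (String × String))) : String :=
  let severities := issues.map (fun issue =>
    PySem.Str.lower ((PySem.Dict.mk issue).getD "severity" "medium"))
  pvScan severities pvSevOrder

-- ===== PORT B =====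
def pvRank : PySem.Dict String Int :=
  PySem.Dict.mk [("critical", 0), ("high", 1), ("medium", 2), ("low", 3), ("info", 4)]

-- one iteration of B's loop body, given the lowered severity name
def pvG (best : Option (Int × String)) (name : String) : Option (Int × String) :=
  match pvRank.get? name with
  | none => best
  | some r =>
    match best with
    | none => some (r, name)
    | some b => if r < b.1 then some (r, name) else some b

def aggregate_severity_py_alt (issues : List (List (String × String))) : String :=
  match issues.foldl (fun best issue =>
      pvG best (PySem.Str.lower ((PySem.Dict.mk issue).getD "severity" "medium"))) none with
  | some b => b.2
  | none => "medium"

-- ===== PRECONDITION & SPEC =====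
def Spec_aggregate_severity_py (issues : List (List (String × String))) (out : String) : Prop := out = aggregate_severity_py_alt issues
instance (issues : List (List (String × String))) (out : String) : Decidable (Spec_aggregate_severity_py issues out) := by unfold Spec_aggregate_severity_py; infer_instance

-- ===== CLAIM (what is proved, stated in full; the proofs are below) =====
def Claim_equal_aggregate_severity_py : Prop := ∀ (issues : List (List (String × String))), Dom_aggregate_severity_py issues → Spec_aggregate_severity_py issues (aggregate_severity_py issues)

-- ===== LEMMAS AND PROOFS =====

-- "minimum with left preference", the merge of two partial fold results
def pvC (a b : Option (Int × String)) : Option (Int × String) :=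
  match b with
  | none => a
  | some q =>
    match a with
    | none => some q
    | some p => if q.1 < p.1 then some q else some p

lemma pvC_none_left (b : Option (Int × String)) : pvC none b = b := by
  cases b <;> rfl

lemma pvC_some_some (p q : Int × String) :
    pvC (some p) (some q) = if q.1 < p.1 then some q else some p := rfl

lemma pvG_eq_pvC (acc : Option (Int × String)) (nm : String) :
    pvG acc nm = pvC acc (pvG none nm) := by
  unfold pvG
  cases h : pvRank.get? nm <;> cases acc <;> simp [pvC]

lemma pvC_assoc (a b c : Option (Int × String)) :
    pvC (pvC a b) c = pvC a (pvC b c) := by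
  rcases a with _ | p
  · rw [pvC_none_left, pvC_none_left]
  · rcases b with _ | q
    · rcases c with _ | r <;> rfl
    · rcases c with _ | r
      · rfl
      · rw [pvC_some_some p q, pvC_some_some q r]
        by_cases h1 : q.1 < p.1
        · rw [if_pos h1]
          by_cases h2 : r.1 < q.1
          · rw [if_pos h2, pvC_some_some q r, if_pos h2, pvC_some_some p r,
              if_pos (by omega)]
          · rw [if_neg h2, pvC_some_some q r, if_neg h2, pvC_some_some p q, if_pos h1]
        · rw [if_neg h1]
          by_cases h2 : r.1 < q.1
          · rw [if_pos h2, pvC_some_some p r]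
          · rw [if_neg h2, pvC_some_some p r, if_neg (by omega), pvC_some_some p q,
              if_neg h1]

lemma foldl_pvG (sevs : List String) (acc : Option (Int × String)) :
    sevs.foldl pvG acc = pvC acc (sevs.foldl pvG none) := by
  induction sevs generalizing acc with
  | nil => cases acc <;> rfl
  | cons s t ih =>
    simp only [List.foldl_cons]
    rw [ih (pvG acc s), ih (pvG none s), pvG_eq_pvC acc s, pvC_assoc]

lemma pvRank_none (nm : String) (h0 : nm ≠ "critical") (h1 : nm ≠ "high")
    (h2 : nm ≠ "medium") (h3 : nm ≠ "low") (h4 : nm ≠ "info") :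
    pvRank.get? nm = none := by
  simp [pvRank, beq_iff_eq, Ne.symm h0, Ne.symm h1, Ne.symm h2, Ne.symm h3, Ne.symm h4,
    PySem.Dict.get?]

lemma pvRank_cases (nm : String) (r : Int) (h : pvRank.get? nm = some r) :
    (nm = "critical" ∧ r = 0) ∨ (nm = "high" ∧ r = 1) ∨ (nm = "medium" ∧ r = 2) ∨
    (nm = "low" ∧ r = 3) ∨ (nm = "info" ∧ r = 4) := by
  by_cases h0 : nm = "critical"
  · subst h0; rw [show pvRank.get? "critical" = some 0 from by decide] at h
    exact Or.inl ⟨rfl, (Option.some.inj h).symm⟩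
  by_cases h1 : nm = "high"
  · subst h1; rw [show pvRank.get? "high" = some 1 from by decide] at h
    exact Or.inr (Or.inl ⟨rfl, (Option.some.inj h).symm⟩)
  by_cases h2 : nm = "medium"
  · subst h2; rw [show pvRank.get? "medium" = some 2 from by decide] at h
    exact Or.inr (Or.inr (Or.inl ⟨rfl, (Option.some.inj h).symm⟩))
  by_cases h3 : nm = "low"
  · subst h3; rw [show pvRank.get? "low" = some 3 from by decide] at h
    exact Or.inr (Or.inr (Or.inr (Or.inl ⟨rfl, (Option.some.inj h).symm⟩)))
  by_cases h4 : nm = "info"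
  · subst h4; rw [show pvRank.get? "info" = some 4 from by decide] at h
    exact Or.inr (Or.inr (Or.inr (Or.inr ⟨rfl, (Option.some.inj h).symm⟩)))
  · rw [pvRank_none nm h0 h1 h2 h3 h4] at h; cases h

-- characterization of B's fold: none ⟺ no ranked name occurs; otherwise the minimal rank
lemma mu_char (sevs : List String) :
    (sevs.foldl pvG none = none ∧ ∀ nm r, pvRank.get? nm = some r → nm ∉ sevs) ∨
    (∃ r nm, sevs.foldl pvG none = some (r, nm) ∧ pvRank.get? nm = some r ∧ nm ∈ sevs ∧
      ∀ nm' r', pvRank.get? nm' = some r' → nm' ∈ sevs → r ≤ r') := by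
  induction sevs with
  | nil => left; simp
  | cons s t ih =>
    have hfold : (s :: t).foldl pvG none = pvC (pvG none s) (t.foldl pvG none) := by
      simp only [List.foldl_cons]
      rw [foldl_pvG t (pvG none s)]
    cases hs : pvRank.get? s with
    | none =>
      have hg : pvG none s = none := by simp [pvG, hs]
      rw [hg, pvC_none_left] at hfold
      rcases ih with ⟨h1, h2⟩ | ⟨r, nm, h1, h2, h3, h4⟩
      · left
        refine ⟨by rw [hfold]; exact h1, ?_⟩
        intro nm r hr
        simp only [List.mem_cons, not_or]
        refine ⟨?_, h2 nm r hr⟩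
        intro he
        rw [he, hs] at hr
        simp at hr
      · right
        refine ⟨r, nm, by rw [hfold]; exact h1, h2, List.mem_cons_of_mem _ h3, ?_⟩
        intro nm' r' hr' hm'
        rcases List.mem_cons.mp hm' with he | hm
        · rw [he, hs] at hr'
          simp at hr'
        · exact h4 nm' r' hr' hm
    | some r0 =>
      have hg : pvG none s = some (r0, s) := by simp [pvG, hs]
      rw [hg] at hfold
      rcases ih with ⟨h1, h2⟩ | ⟨r, nm, h1, h2, h3, h4⟩
      · right
        refine ⟨r0, s, ?_, hs, List.mem_cons_self .., ?_⟩
        · rw [hfold, h1]; rfl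
        · intro nm' r' hr' hm'
          rcases List.mem_cons.mp hm' with he | hm
          · rw [he, hs] at hr'
            have : r0 = r' := Option.some.inj hr'
            omega
          · exact absurd hm (h2 nm' r' hr')
      · right
        rw [h1, pvC_some_some] at hfold
        by_cases hlt : r < r0
        · refine ⟨r, nm, ?_, h2, List.mem_cons_of_mem _ h3, ?_⟩
          · rw [hfold]; rw [if_pos hlt]
          · intro nm' r' hr' hm'
            rcases List.mem_cons.mp hm' with he | hm
            · rw [he, hs] at hr'
              have : r0 = r' := Option.some.inj hr'
              omega
            · exact h4 nm' r' hr' hm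
        · refine ⟨r0, s, ?_, hs, List.mem_cons_self .., ?_⟩
          · rw [hfold]; rw [if_neg hlt]
          · intro nm' r' hr' hm'
            rcases List.mem_cons.mp hm' with he | hm
            · rw [he, hs] at hr'
              have : r0 = r' := Option.some.inj hr'
              omega
            · have := h4 nm' r' hr' hm; omega

lemma scan_eq (sevs : List String) :
    pvScan sevs pvSevOrder =
      (match sevs.foldl pvG none with
       | some b => b.2
       | none => "medium") := by
  rcases mu_char sevs with ⟨h1, h2⟩ | ⟨r, nm, h1, h2, h3, h4⟩
  · rw [h1]
    have c0 : "critical" ∉ sevs := h2 _ 0 (by decide)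
    have c1 : "high" ∉ sevs := h2 _ 1 (by decide)
    have c2 : "medium" ∉ sevs := h2 _ 2 (by decide)
    have c3 : "low" ∉ sevs := h2 _ 3 (by decide)
    have c4 : "info" ∉ sevs := h2 _ 4 (by decide)
    simp [pvScan, pvSevOrder, c0, c1, c2, c3, c4]
  · rw [h1]
    rcases pvRank_cases nm r h2 with ⟨he, hr⟩ | ⟨he, hr⟩ | ⟨he, hr⟩ | ⟨he, hr⟩ | ⟨he, hr⟩ <;>
      subst he <;> subst hr
    · simp [pvScan, pvSevOrder, h3]
    · have c0 : "critical" ∉ sevs := fun hm => by have := h4 _ 0 (by decide) hm; omega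
      simp [pvScan, pvSevOrder, c0, h3]
    · have c0 : "critical" ∉ sevs := fun hm => by have := h4 _ 0 (by decide) hm; omega
      have c1 : "high" ∉ sevs := fun hm => by have := h4 _ 1 (by decide) hm; omega
      simp [pvScan, pvSevOrder, c0, c1, h3]
    · have c0 : "critical" ∉ sevs := fun hm => by have := h4 _ 0 (by decide) hm; omega
      have c1 : "high" ∉ sevs := fun hm => by have := h4 _ 1 (by decide) hm; omega
      have c2 : "medium" ∉ sevs := fun hm => by have := h4 _ 2 (by decide) hm; omega
      simp [pvScan, pvSevOrder, c0, c1, c2, h3]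
    · have c0 : "critical" ∉ sevs := fun hm => by have := h4 _ 0 (by decide) hm; omega
      have c1 : "high" ∉ sevs := fun hm => by have := h4 _ 1 (by decide) hm; omega
      have c2 : "medium" ∉ sevs := fun hm => by have := h4 _ 2 (by decide) hm; omega
      have c3 : "low" ∉ sevs := fun hm => by have := h4 _ 3 (by decide) hm; omega
      simp [pvScan, pvSevOrder, c0, c1, c2, c3, h3]

-- ===== VERDICT (by name: the statement is the Claim_ definition above) =====
theorem aggregate_severity_py_spec : Claim_equal_aggregate_severity_py := by
  intro issues _
  unfold Spec_aggregate_severity_py aggregate_severity_py aggregate_severity_py_alt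
  have h := scan_eq (issues.map fun issue =>
    PySem.Str.lower ((PySem.Dict.mk issue).getD "severity" "medium"))
  rw [List.foldl_map] at h
  exact h
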